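-- pv_equiv track=rewrite | github.com/michaelo48/leetsink | 2428-equal-row-and-column-pairs/equal-row-and-column-pairs.py | equalPairs
-- ===== SOURCE A (Python) =====
-- def equalPairs(grid):
--     """
--     :type grid: List[List[int]]
--     :rtype: int
--     """
--     columns = []
--     count = 0
--     for h in range(len(grid)):
--         column = []
--         for n in grid:
--             column.append(n[h])
--         columns.append(column)
--
--     for i in grid:
--         for j in columns:
--             if i == j:
--                 count = count + 1
--     return count
-- ===== SOURCE B (Python) =====
-- def equalPairs(grid):
--     n = len(grid)
--     freq = {}
--     for row in grid:
--         t = tuple(row)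
--         freq[t] = freq.get(t, 0) + 1
--     total = 0
--     for h in range(n):
--         col = tuple(row[h] for row in grid)
--         total += freq.get(col, 0)
--     return total
-- ===== Notes on version B (the rewrite author's own statement) =====
-- stated objective: alternative
-- what changed: B counts row tuples in a hash map once and, for each column, adds the count of rows equal to that column, replacing A's materialised column list plus all-pairs row-column comparison; it trades A's n^2 list comparisons for n hashed lookups.
import Mathlib
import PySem

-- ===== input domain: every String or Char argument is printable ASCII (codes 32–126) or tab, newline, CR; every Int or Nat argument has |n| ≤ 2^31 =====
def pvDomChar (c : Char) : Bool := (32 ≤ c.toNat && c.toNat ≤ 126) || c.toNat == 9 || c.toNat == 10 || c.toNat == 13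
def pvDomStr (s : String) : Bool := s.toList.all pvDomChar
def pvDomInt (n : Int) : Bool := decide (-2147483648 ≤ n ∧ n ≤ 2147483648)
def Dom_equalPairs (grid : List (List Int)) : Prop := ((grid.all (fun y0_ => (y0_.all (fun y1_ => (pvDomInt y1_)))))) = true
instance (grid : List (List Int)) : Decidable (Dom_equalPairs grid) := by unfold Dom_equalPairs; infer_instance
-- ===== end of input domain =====

-- B replaces A's all-pairs row-vs-column comparison by a hash count of rows looked up once per column (alternative algorithm, same measured cost).

-- ===== PORT A =====
def equalPairs (grid : List (List Int)) : Int :=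
  let columns := (PySem.List.pyRange 0 (grid.length : Int) 1).foldl
    (fun cols h => cols ++ [grid.foldl (fun column n => column ++ [PySem.List.pyGetD n h 0]) []]) []
  grid.foldl (fun count i => columns.foldl (fun count j => if i == j then count + 1 else count) count) 0

-- ===== PORT B =====
def equalPairs_alt (grid : List (List Int)) : Int :=
  let freq : PySem.Dict (List Int) Int :=
    grid.foldl (fun d row => d.insert row (d.getD row 0 + 1)) PySem.Dict.empty
  (PySem.List.pyRange 0 (grid.length : Int) 1).foldl
    (fun total h => total + freq.getD (grid.map (fun row => PySem.List.pyGetD row h 0)) 0) 0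

-- ===== PRECONDITION & SPEC =====
-- Pre_ excludes exactly the ragged grids on which Python A (and B) raise IndexError: a row shorter than len(grid).
def Pre_equalPairs (grid : List (List Int)) : Prop := ∀ row ∈ grid, grid.length ≤ row.length
instance (grid : List (List Int)) : Decidable (Pre_equalPairs grid) := by unfold Pre_equalPairs; infer_instance
def pvWitness_equalPairs : List (List Int) := [[1, 2], [2, 2]]
def Spec_equalPairs (grid : List (List Int)) (out : Int) : Prop := out = equalPairs_alt grid
instance (grid : List (List Int)) (out : Int) : Decidable (Spec_equalPairs grid out) := by unfold Spec_equalPairs; infer_instance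

-- ===== CLAIM (what is proved, stated in full; the proofs are below) =====
def Claim_equal_equalPairs : Prop := ∀ (grid : List (List Int)), Dom_equalPairs grid → Pre_equalPairs grid → Spec_equalPairs grid (equalPairs grid)

-- ===== LEMMAS AND PROOFS =====

-- number of (i, j) pairs with i = j, summed either way
theorem pv_sum_count_cons (l1 : List (List Int)) (j : List Int) (l2 : List (List Int)) :
    (l1.map (fun i => ((j :: l2).count i : Int))).sum
      = (l1.count j : Int) + (l1.map (fun i => (l2.count i : Int))).sum := by
  induction l1 with
  | nil => simp
  | cons i l1 ih =>
    simp only [List.map_cons, List.sum_cons]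
    rw [ih, List.count_cons, List.count_cons]
    push_cast
    by_cases h : i = j
    · simp [h]; ring
    · simp [h, Ne.symm h]; ring

theorem pv_double_count (l1 l2 : List (List Int)) :
    (l1.map (fun i => (l2.count i : Int))).sum = (l2.map (fun j => (l1.count j : Int))).sum := by
  induction l2 with
  | nil => simp
  | cons j l2 ih =>
    rw [pv_sum_count_cons, ih]
    simp

theorem pv_A_eq (grid : List (List Int)) :
    equalPairs grid =
      (((PySem.List.pyRange 0 (grid.length : Int) 1).map
          (fun h => grid.map (fun row => PySem.List.pyGetD row h 0))).map
        (fun j => (grid.count j : Int))).sum := by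
  unfold equalPairs
  simp only [PySem.List.foldl_append_singleton_eq_map, List.nil_append]
  refine Eq.trans (PySem.List.foldl_congr_mem (g := fun count i =>
      count + ((((PySem.List.pyRange 0 (grid.length : Int) 1).map
        (fun h => grid.map (fun row => PySem.List.pyGetD row h 0))).count i : Int))) _ _ _ ?_) ?_
  · intro acc i _
    refine Eq.trans (PySem.List.foldl_congr_mem
        (g := fun count j => if j == i then count + 1 else count) _ _ _ ?_)
      (PySem.List.foldl_beq_add_one _ _ _)
    intro a x _
    by_cases hx : i = x
    · simp [hx]
    · simp [hx, Ne.symm hx]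
  · rw [PySem.List.foldl_add, zero_add, pv_double_count]

theorem pv_B_eq (grid : List (List Int)) :
    equalPairs_alt grid =
      (((PySem.List.pyRange 0 (grid.length : Int) 1).map
          (fun h => grid.map (fun row => PySem.List.pyGetD row h 0))).map
        (fun j => (grid.count j : Int))).sum := by
  unfold equalPairs_alt
  rw [PySem.Dict.foldl_insert_getD_add_one_eq_counter]
  rw [PySem.List.foldl_add (g := fun h =>
      (PySem.Dict.counter grid).getD (grid.map (fun row => PySem.List.pyGetD row h 0)) 0)]
  simp only [PySem.Dict.getD_counter, List.map_map, Function.comp_def, zero_add]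

-- ===== VERDICT (by name: the statement is the Claim_ definition above) =====
theorem equalPairs_spec : Claim_equal_equalPairs := by
  intro grid _ _
  unfold Spec_equalPairs
  rw [pv_A_eq, pv_B_eq]
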